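-- pv_equiv track=rewrite | github.com/SERIAL-OCR/apple-ocr-backend | scripts/optimize_character_recognition.py | apply_character_corrections
-- ===== SOURCE A (Python) =====
-- from typing import Dict, List, Tuple, Optional
--
-- CHAR_CONFUSION = {
--     '6': 'G',  # 6 is often confused with G
--     '5': 'S',  # 5 is often confused with S
--     '0': 'O',  # 0 is often confused with O
--     '1': 'I',  # 1 is often confused with I
--     '4': 'A',  # 4 is often confused with A
--     '8': 'B',  # 8 is often confused with B
-- }
--
-- def apply_character_corrections(detected: str) -> List[str]:
--     """Apply character corrections based on common OCR confusions."""
--     variants = [detected]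
--
--     # Generate all possible variants by replacing commonly confused characters
--     for i, char in enumerate(detected):
--         if char in CHAR_CONFUSION:
--             for variant in list(variants):  # Create a copy to avoid modifying during iteration
--                 corrected = variant[:i] + CHAR_CONFUSION[char] + variant[i+1:]
--                 variants.append(corrected)
--         elif char in CHAR_CONFUSION.values():
--             # Also try the reverse mapping
--             reverse_map = {v: k for k, v in CHAR_CONFUSION.items()}
--             if char in reverse_map:
--                 for variant in list(variants):
--                     corrected = variant[:i] + reverse_map[char] + variant[i+1:]
--                     variants.append(corrected)
--
--     return variants
-- ===== SOURCE B (Python) =====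
-- from typing import Dict, List, Tuple, Optional
--
-- CHAR_CONFUSION = {
--     '6': 'G',
--     '5': 'S',
--     '0': 'O',
--     '1': 'I',
--     '4': 'A',
--     '8': 'B',
-- }
--
-- def apply_character_corrections(detected: str) -> List[str]:
--     """Precompute the confusable positions once, then enumerate all 2**k
--     substitution combinations by bit mask (first confusable = least significant bit)."""
--     reverse_map = {v: k for k, v in CHAR_CONFUSION.items()}
--
--     def repl(ch):
--         if ch in CHAR_CONFUSION:
--             return CHAR_CONFUSION[ch]
--         if ch in CHAR_CONFUSION.values():
--             return reverse_map.get(ch)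
--         return None
--
--     subs = [(i, r) for i, ch in enumerate(detected) if (r := repl(ch)) is not None]
--     out = []
--     for mask in range(2 ** len(subs)):
--         chars = list(detected)
--         m = mask
--         for i, r in subs:
--             if m % 2 == 1:
--                 chars[i] = r
--             m //= 2
--         out.append(''.join(chars))
--     return out
-- ===== Notes on version B (the rewrite author's own statement) =====
-- stated objective: alternative
-- what changed: Replaces A's incremental doubling of the variants list at each confusable character by a single precompute of the (index, replacement) positions followed by a bit-mask enumeration of all 2^k substitution combinations (first confusable position = least significant bit), producing the identical list in the identical order.
import Mathlib
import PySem

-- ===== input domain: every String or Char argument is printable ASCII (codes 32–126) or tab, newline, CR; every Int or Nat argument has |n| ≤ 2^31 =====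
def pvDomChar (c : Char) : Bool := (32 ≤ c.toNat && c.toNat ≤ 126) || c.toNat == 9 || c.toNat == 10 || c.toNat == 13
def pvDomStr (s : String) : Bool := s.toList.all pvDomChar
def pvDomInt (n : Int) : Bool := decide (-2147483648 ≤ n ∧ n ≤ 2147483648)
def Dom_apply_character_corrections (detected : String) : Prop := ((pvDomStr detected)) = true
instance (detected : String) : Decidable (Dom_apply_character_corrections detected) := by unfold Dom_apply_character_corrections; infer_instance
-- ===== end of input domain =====

-- B replaces A's incremental variant-list doubling by a precompute of the confusable
-- positions followed by a bit-mask enumeration of all 2^k substitution combinations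
-- (objective: alternative decomposition, same output order; same asymptotic cost).

-- ===== PORT A =====

-- CHAR_CONFUSION (module constant)
def pvCC : PySem.Dict Char Char :=
  PySem.Dict.ofList [('6', 'G'), ('5', 'S'), ('0', 'O'), ('1', 'I'), ('4', 'A'), ('8', 'B')]

-- reverse_map = {v: k for k, v in CHAR_CONFUSION.items()}  (rebuilt inside A's loop; a pure constant)
def pvRev : PySem.Dict Char Char :=
  pvCC.items.foldl (fun d p => d.insert p.2 p.1) PySem.Dict.empty

-- variant[:i] + <r> + variant[i+1:]
def pvSub (i : Int) (r : Char) (v : List Char) : List Char :=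
  PySem.List.slice v none (some i) ++ [r] ++ PySem.List.slice v (some (i + 1)) none

-- the body of A's 'for i, char in enumerate(detected)' loop
def pvStepA (variants : List (List Char)) (p : Int × Char) : List (List Char) :=
  match PySem.Dict.get? pvCC p.2 with
  | some r => variants ++ variants.map (pvSub p.1 r)          -- if char in CHAR_CONFUSION
  | none =>
    if p.2 ∈ PySem.Dict.values pvCC then                      -- elif char in CHAR_CONFUSION.values()
      match PySem.Dict.get? pvRev p.2 with                    -- if char in reverse_map
      | some r => variants ++ variants.map (pvSub p.1 r)
      | none => variants
    else variants

def apply_character_corrections (detected : String) : List String :=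
  ((PySem.List.enumerate detected.toList).foldl pvStepA [detected.toList]).map String.ofList

-- ===== PORT B =====

-- Source B's repl(ch)
def pvRepl (c : Char) : Option Char :=
  match PySem.Dict.get? pvCC c with
  | some r => some r
  | none => if c ∈ PySem.Dict.values pvCC then PySem.Dict.get? pvRev c else none

-- Source B's inner loop: for i, r in subs: if m % 2 == 1: chars[i] = r; m //= 2
def pvApplyMask : List Char → List (Int × Char) → Nat → List Char
  | v, [], _ => v
  | v, (i, r) :: rest, m =>
    pvApplyMask (if m % 2 = 1 then PySem.List.pySetD v i r else v) rest (m / 2)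

def apply_character_corrections_alt (detected : String) : List String :=
  let cs := detected.toList
  let subs := (PySem.List.enumerate cs).filterMap (fun p => (pvRepl p.2).map (fun r => (p.1, r)))
  (List.range (2 ^ subs.length)).map (fun mask => String.ofList (pvApplyMask cs subs mask))

-- ===== PRECONDITION & SPEC =====
def Spec_apply_character_corrections (detected : String) (out : List String) : Prop := out = apply_character_corrections_alt detected
instance (detected : String) (out : List String) : Decidable (Spec_apply_character_corrections detected out) := by unfold Spec_apply_character_corrections; infer_instance

-- ===== CLAIM (what is proved, stated in full; the proofs are below) =====
def Claim_equal_apply_character_corrections : Prop := ∀ (detected : String), Dom_apply_character_corrections detected → Spec_apply_character_corrections detected (apply_character_corrections detected)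

-- ===== LEMMAS AND PROOFS =====

def pvSubs (es : List (Int × Char)) : List (Int × Char) :=
  es.filterMap (fun p => (pvRepl p.2).map (fun r => (p.1, r)))

lemma pvStepA_eq (vs : List (List Char)) (i : Int) (c : Char) :
    pvStepA vs (i, c) =
      match pvRepl c with
      | some r => vs ++ vs.map (pvSub i r)
      | none => vs := by
  unfold pvStepA pvRepl
  cases h : PySem.Dict.get? pvCC c
  · simp only
    split
    · cases PySem.Dict.get? pvRev c <;> simp
    · simp
  · simp

lemma pvSub_eq_set (k : Nat) (r : Char) (v : List Char) (hk : k < v.length) :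
    pvSub (k : Int) r v = v.set k r := by
  unfold pvSub
  rw [PySem.List.slice_to_natCast]
  have h1 : ((k : Int) + 1) = ((k + 1 : Nat) : Int) := by push_cast; ring
  rw [h1, PySem.List.slice_from_natCast]
  rw [List.set_eq_take_append_cons_drop, if_pos hk]
  simp

lemma range_double_flatMap {β : Type} (g : Nat → List β) (n : Nat) :
    (List.range (2 * n)).flatMap g
      = (List.range n).flatMap (fun t => g (2 * t) ++ g (2 * t + 1)) := by
  induction n with
  | zero => simp
  | succ m ih =>
    have h2 : 2 * (m + 1) = (2 * m + 1) + 1 := by omega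
    rw [h2, List.range_succ, List.range_succ, List.range_succ]
    simp only [List.flatMap_append, ih, List.flatMap_cons, List.flatMap_nil]
    simp [List.append_assoc]

lemma pvApplyMask_cons (v : List Char) (i : Int) (r : Char) (qs : List (Int × Char)) (m : Nat) :
    pvApplyMask v ((i, r) :: qs) m
      = pvApplyMask (if m % 2 = 1 then PySem.List.pySetD v i r else v) qs (m / 2) := rfl

lemma map_flatMap_singleton {α β γ : Type} (f : β → γ) (g : α → β) (l : List α) :
    (l.flatMap (fun m => [g m])).map f = l.map (fun m => f (g m)) := by
  induction l with
  | nil => rfl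
  | cons a t ih => simp [List.flatMap_cons, ih]

lemma pvFoldl_stepA (n : Nat) (es : List (Int × Char)) (vs : List (List Char))
    (hidx : ∀ e ∈ es, ∃ k : Nat, e.1 = (k : Int) ∧ k < n)
    (hlen : ∀ v ∈ vs, v.length = n) :
    es.foldl pvStepA vs
      = (List.range (2 ^ (pvSubs es).length)).flatMap
          (fun m => vs.map (fun v => pvApplyMask v (pvSubs es) m)) := by
  induction es generalizing vs with
  | nil =>
    simp [pvSubs, pvApplyMask]
  | cons e rest ih =>
    obtain ⟨i, c⟩ := e
    obtain ⟨k, hki, hkn⟩ := hidx (i, c) (by simp)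
    have hidx' : ∀ e ∈ rest, ∃ k : Nat, e.1 = (k : Int) ∧ k < n := by
      intro e he; exact hidx e (List.mem_cons_of_mem _ he)
    rw [List.foldl_cons, pvStepA_eq]
    cases hr : pvRepl c with
    | none =>
      simp only
      have hsubs : pvSubs ((i, c) :: rest) = pvSubs rest := by
        simp [pvSubs, hr]
      rw [hsubs]
      exact ih vs hidx' hlen
    | some r =>
      simp only
      have hsubs : pvSubs ((i, c) :: rest) = (i, r) :: pvSubs rest := by
        simp [pvSubs, hr]
      -- the doubled variant list, every element still of length n
      have hki' : i = (k : Int) := hki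
      have hsub_len : ∀ v ∈ vs, pvSub i r v = v.set k r := by
        intro v hv
        rw [hki', pvSub_eq_set k r v (by rw [hlen v hv]; exact hkn)]
      have hlen' : ∀ v ∈ vs ++ vs.map (pvSub i r), v.length = n := by
        intro v hv
        rcases List.mem_append.mp hv with h | h
        · exact hlen v h
        · obtain ⟨w, hw, rfl⟩ := List.mem_map.mp h
          rw [hsub_len w hw, List.length_set]; exact hlen w hw
      rw [ih (vs ++ vs.map (pvSub i r)) hidx' hlen', hsubs]
      have hpow : 2 ^ ((i, r) :: pvSubs rest).length = 2 * 2 ^ (pvSubs rest).length := by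
        simp [List.length_cons, pow_succ]; ring
      rw [hpow, range_double_flatMap]
      congr 1
      funext m
      rw [List.map_append, List.map_map]
      congr 1
      · apply List.map_congr_left
        intro v hv
        rw [pvApplyMask_cons]
        have h0 : (2 * m) % 2 = 0 := by omega
        have h1 : (2 * m) / 2 = m := by omega
        rw [h0, h1]
        simp
      · apply List.map_congr_left
        intro v hv
        rw [Function.comp_apply, pvApplyMask_cons]
        have h0 : (2 * m + 1) % 2 = 1 := by omega
        have h1 : (2 * m + 1) / 2 = m := by omega
        rw [h0, h1, if_pos rfl, hsub_len v hv, hki', PySem.List.pySetD_natCast]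
    
-- ===== VERDICT (by name: the statement is the Claim_ definition above) =====
theorem apply_character_corrections_spec : Claim_equal_apply_character_corrections := by
  intro detected _hdom
  unfold Spec_apply_character_corrections
  simp only [apply_character_corrections, apply_character_corrections_alt]
  have hidx : ∀ e ∈ PySem.List.enumerate detected.toList, ∃ k : Nat,
      e.1 = (k : Int) ∧ k < detected.toList.length := by
    intro e he
    rw [PySem.List.mem_enumerate_iff] at he
    obtain ⟨k, hk, rfl⟩ := he
    exact ⟨k, by simp, hk⟩
  have hlen : ∀ v ∈ [detected.toList], v.length = detected.toList.length := by
    intro v hv; simp at hv; rw [hv]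
  have h := pvFoldl_stepA detected.toList.length (PySem.List.enumerate detected.toList)
      [detected.toList] hidx hlen
  simp only [pvSubs] at h
  rw [h]
  exact map_flatMap_singleton _ _ _
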